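-- pv_equiv track=rewrite | github.com/pkasemir/advent-of-code | 2015/day1/day1.py | get_final_floor
-- ===== SOURCE A (Python) =====
-- def get_final_floor(line):
--     floor = 0
--     position = None
--     for i, c in enumerate(line):
--         if c == '(':
--             floor += 1
--         else:
--             floor -= 1
--         if position is None and floor == -1:
--             position = i + 1
--
--     return floor, position
-- ===== SOURCE B (Python) =====
-- def get_final_floor(line):
--     # Closed form for the final floor: every '(' is +1, every other char is -1.
--     floor = 2 * line.count('(') - len(line)
--     # Separate scan for the first time the balance hits -1.
--     position = None
--     balance = 0
--     for i, c in enumerate(line):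
--         balance += 1 if c == '(' else -1
--         if balance == -1:
--             position = i + 1
--             break
--     return floor, position
-- ===== Notes on version B (the rewrite author's own statement) =====
-- stated objective: faster
-- what changed: B computes the final floor in closed form from the count of up-steps and the line length instead of accumulating it, and finds the first-basement position with a separate early-exit scan that breaks at the first balance of -1, instead of A's single full pass carrying both pieces of state.
import Mathlib
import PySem

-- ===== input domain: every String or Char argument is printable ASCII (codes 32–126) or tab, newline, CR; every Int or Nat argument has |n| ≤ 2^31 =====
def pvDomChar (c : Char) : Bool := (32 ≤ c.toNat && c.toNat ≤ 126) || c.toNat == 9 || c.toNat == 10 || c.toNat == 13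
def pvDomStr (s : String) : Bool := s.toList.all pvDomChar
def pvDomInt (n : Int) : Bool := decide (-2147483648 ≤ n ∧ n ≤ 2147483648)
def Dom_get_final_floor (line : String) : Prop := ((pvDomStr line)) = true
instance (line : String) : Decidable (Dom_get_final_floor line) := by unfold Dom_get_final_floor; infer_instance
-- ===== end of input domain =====

-- B computes the final floor in closed form (2*count('(') - len) and the first-basement
-- position with a separate early-exit scan, instead of A's single stateful pass.

-- ===== PORT A =====
-- A's loop body: update floor, then set position if it is still None and floor == -1.
def gffStep (st : Int × Option Int) (p : Int × Char) : Int × Option Int :=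
  let floor := if p.2 = '(' then st.1 + 1 else st.1 - 1
  let position := if st.2 = none ∧ floor = -1 then some (p.1 + 1) else st.2
  (floor, position)

-- A: one pass over enumerate(line) carrying (floor, position).
def get_final_floor (line : String) : Int × Option Int :=
  (PySem.List.enumerate line.toList 0).foldl gffStep (0, none)

-- ===== PORT B =====
-- B's scan: running balance, returns i+1 the first time the balance reaches -1 (the break).
def gffScan : List Char → Int → Int → Option Int
  | [], _, _ => none
  | c :: cs, i, bal =>
    let bal' := bal + (if c = '(' then 1 else -1)
    if bal' = -1 then some (i + 1) else gffScan cs (i + 1) bal'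

def get_final_floor_alt (line : String) : Int × Option Int :=
  (2 * (PySem.Str.count line "(" : Int) - PySem.Str.len line, gffScan line.toList 0 0)

-- ===== PRECONDITION & SPEC =====
def Spec_get_final_floor (line : String) (out : Int × Option Int) : Prop := out = get_final_floor_alt line
instance (line : String) (out : Int × Option Int) : Decidable (Spec_get_final_floor line out) := by unfold Spec_get_final_floor; infer_instance

-- ===== CLAIM (what is proved, stated in full; the proofs are below) =====
def Claim_equal_get_final_floor : Prop := ∀ (line : String), Dom_get_final_floor line → Spec_get_final_floor line (get_final_floor line)

-- ===== LEMMAS AND PROOFS =====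

-- Python str.count with a single-char needle counts occurrences of that char.
theorem gff_count_go (cs : List Char) : ∀ (fuel acc : Nat), cs.length ≤ fuel →
    PySem.Chars.count.go ['('] fuel cs acc = acc + cs.count '(' := by
  induction cs with
  | nil => intro fuel acc _; cases fuel <;> simp [PySem.Chars.count.go]
  | cons c cs ih =>
    intro fuel acc h
    cases fuel with
    | zero => simp at h
    | succ fuel =>
      have hf : cs.length ≤ fuel := by simpa using h
      rw [show PySem.Chars.count.go ['('] (fuel + 1) (c :: cs) acc
          = if List.isPrefixOf ['('] (c :: cs)
            then PySem.Chars.count.go ['('] fuel (List.drop 1 (c :: cs)) (acc + 1)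
            else PySem.Chars.count.go ['('] fuel cs acc from rfl]
      by_cases hc : c = '('
      · have hp : List.isPrefixOf ['('] (c :: cs) = true := by
          simp [List.isPrefixOf, hc]
        rw [if_pos hp]
        simp only [List.drop_succ_cons, List.drop_zero]
        rw [ih fuel (acc + 1) hf, List.count_cons, if_pos (by simp [hc])]
        omega
      · have hp : List.isPrefixOf ['('] (c :: cs) = false := by
          simp [List.isPrefixOf]
          intro h'; exact hc h'.symm
        rw [if_neg (by simp [hp])]
        rw [ih fuel acc hf, List.count_cons, if_neg (by simp [hc])]
        omega

theorem gff_count (line : String) :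
    PySem.Str.count line "(" = line.toList.count '(' := by
  rw [PySem.Str.count_eq]
  show PySem.Chars.count line.toList ['('] = _
  unfold PySem.Chars.count
  simp only [List.isEmpty_cons, if_false, Bool.false_eq_true]
  simpa using gff_count_go line.toList line.toList.length 0 le_rfl

-- The loop invariant tying A's single fold to B's closed form + scan.
theorem gff_fold (cs : List Char) : ∀ (s fl : Int) (pos : Option Int),
    (PySem.List.enumerate cs s).foldl gffStep (fl, pos)
    = (fl + 2 * (cs.count '(' : Int) - cs.length,
       match pos with | some p => some p | none => gffScan cs s fl) := by
  induction cs with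
  | nil =>
    intro s fl pos
    simp only [PySem.List.enumerate_nil, List.foldl_nil]
    cases pos <;> simp [gffScan]
  | cons c cs ih =>
    intro s fl pos
    rw [PySem.List.enumerate_cons, List.foldl_cons]
    have hstep : gffStep (fl, pos) (s, c)
        = ((if c = '(' then fl + 1 else fl - 1),
           if pos = none ∧ (if c = '(' then fl + 1 else fl - 1) = -1
           then some (s + 1) else pos) := rfl
    rw [hstep, ih]
    have e1 : fl + (1 : Int) = fl + 1 := rfl
    have e2 : fl + (-1 : Int) = fl - 1 := by ring
    rcases pos with _ | p
    · by_cases hc : c = '('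
      · by_cases hfl : fl + 1 = -1
        · simp [gffScan, hc, hfl, Prod.ext_iff]
          omega
        · simp [gffScan, hc, hfl, Prod.ext_iff]
          omega
      · by_cases hfl : fl - 1 = -1
        · simp [gffScan, hc, hfl, e2, Prod.ext_iff]
          omega
        · simp [gffScan, hc, hfl, e2, Prod.ext_iff]
          omega
    · by_cases hc : c = '(' <;>
        · simp [hc, Prod.ext_iff]
          omega

-- ===== VERDICT (by name: the statement is the Claim_ definition above) =====
theorem get_final_floor_spec : Claim_equal_get_final_floor := by
  intro line _
  unfold Spec_get_final_floor get_final_floor get_final_floor_alt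
  rw [gff_fold line.toList 0 0 none, gff_count]
  simp [PySem.Str.len]
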